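-- pv_equiv track=rewrite | github.com/Wulfic/Cicada3301 | Tools/try_running_key_p59.py | text_to_rune_indices
-- ===== SOURCE A (Python) =====
-- RUNE_MAP = {
--     'F': 0, 'U': 1, 'TH': 2, 'O': 3, 'R': 4, 'C': 5, 'G': 6, 'W': 7,
--     'H': 8, 'N': 9, 'I': 10, 'J': 11, 'EO': 12, 'P': 13, 'X': 14, 'S': 15,
--     'T': 16, 'B': 17, 'E': 18, 'M': 19, 'L': 20, 'NG': 21, 'OE': 22, 'D': 23,
--     'A': 24, 'AE': 25, 'Y': 26, 'IA': 27, 'EA': 28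
-- }
--
-- def text_to_rune_indices(text):
--     # Heuristic conversion
--     # TH -> 2, NG -> 21, EO -> 12, AE -> 25, OE -> 22, IA -> 27, EA -> 28
--     # Greedy match
--     text = text.upper()
--     indices = []
--     i = 0
--     while i < len(text):
--         c = text[i]
--         if not c.isalpha():
--             i += 1
--             continue
--
--         # Check 2-char combos
--         if i + 1 < len(text):
--             pair = text[i:i+2]
--             if pair in RUNE_MAP:
--                 indices.append(RUNE_MAP[pair])
--                 i += 2
--                 continue
--
--         # Check 1-char
--         if c in RUNE_MAP:
--             indices.append(RUNE_MAP[c])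
--         elif c == 'K': indices.append(RUNE_MAP['C']) # K -> C
--         elif c == 'V': indices.append(RUNE_MAP['U']) # V -> U
--         elif c == 'Z': indices.append(RUNE_MAP['S']) # Z -> S? Or specific? Known usage?
--         elif c == 'Q': indices.append(RUNE_MAP['C']) # Q -> K -> C
--         else:
--             # Skip unknown
--             pass
--         i += 1
--     return indices
-- ===== SOURCE B (Python) =====
-- # One streaming pass with a "pending char" state and two lookup tables,
-- # instead of an index loop with lookahead slicing and an elif chain.
-- PAIRS = {'TH': 2, 'EO': 12, 'NG': 21, 'OE': 22, 'AE': 25, 'IA': 27, 'EA': 28}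
-- SINGLES = {
--     'F': 0, 'U': 1, 'O': 3, 'R': 4, 'C': 5, 'G': 6, 'W': 7, 'H': 8,
--     'N': 9, 'I': 10, 'J': 11, 'P': 13, 'X': 14, 'S': 15, 'T': 16,
--     'B': 17, 'E': 18, 'M': 19, 'L': 20, 'D': 23, 'A': 24, 'Y': 26,
--     'K': 5, 'V': 1, 'Z': 15, 'Q': 5,
-- }
--
-- def text_to_rune_indices(text):
--     out = []
--     pending = None
--     for c in text.upper():
--         if pending is not None and pending + c in PAIRS:
--             out.append(PAIRS[pending + c])
--             pending = None
--         else: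
--             if pending is not None and pending in SINGLES:
--                 out.append(SINGLES[pending])
--             pending = c
--     if pending is not None and pending in SINGLES:
--         out.append(SINGLES[pending])
--     return out
-- ===== Notes on version B (the rewrite author's own statement) =====
-- stated objective: alternative
-- what changed: Replaces A's index-based while loop with lookahead slicing, an isalpha guard and a K/V/Z/Q elif fallback chain by a single streaming fold that carries a pending-character state and consults two precomputed tables (pair combos and single letters including the K/V/Z/Q aliases).
import Mathlib
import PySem

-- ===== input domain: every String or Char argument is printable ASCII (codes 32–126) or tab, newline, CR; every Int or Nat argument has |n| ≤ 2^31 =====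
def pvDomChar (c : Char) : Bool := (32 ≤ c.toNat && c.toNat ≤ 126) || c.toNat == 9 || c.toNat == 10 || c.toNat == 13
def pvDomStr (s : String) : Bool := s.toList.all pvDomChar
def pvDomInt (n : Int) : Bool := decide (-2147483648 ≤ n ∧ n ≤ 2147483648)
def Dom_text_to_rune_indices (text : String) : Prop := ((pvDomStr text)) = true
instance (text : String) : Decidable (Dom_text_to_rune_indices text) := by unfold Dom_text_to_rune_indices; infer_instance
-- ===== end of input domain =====

-- B replaces A's index loop with lookahead slicing and an elif fallback chain by a single
-- streaming fold carrying a "pending char" state over two lookup tables (objective: alternative).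

-- ===== PORT A =====
def runeMap : PySem.Dict String Int := PySem.Dict.mk
  [("F",0),("U",1),("TH",2),("O",3),("R",4),("C",5),("G",6),("W",7),
   ("H",8),("N",9),("I",10),("J",11),("EO",12),("P",13),("X",14),("S",15),
   ("T",16),("B",17),("E",18),("M",19),("L",20),("NG",21),("OE",22),("D",23),
   ("A",24),("AE",25),("Y",26),("IA",27),("EA",28)]

-- the 1-char branch of A: 'c in RUNE_MAP' then the K/V/Z/Q elif chain
-- (RUNE_MAP['C'] / ['U'] / ['S'] ported as getD with the key present, exact here)
def runeSingle (c : Char) : List Int :=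
  match runeMap.get? (String.ofList [c]) with
  | some v => [v]
  | none =>
    if c = 'K' then [runeMap.getD "C" 0]
    else if c = 'V' then [runeMap.getD "U" 0]
    else if c = 'Z' then [runeMap.getD "S" 0]
    else if c = 'Q' then [runeMap.getD "C" 0]
    else []

-- A's while-loop over index i, as structural recursion on the remaining characters
-- (i += 1 drops one char, i += 2 after a pair match drops two)
def runeLoop : List Char → List Int
  | [] => []
  | c :: rest =>
    if PySem.Chars.isalpha c = false then runeLoop rest
    else
      match rest with
      | d :: rest2 =>
        match runeMap.get? (String.ofList [c, d]) with
        | some v => v :: runeLoop rest2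
        | none => runeSingle c ++ runeLoop (d :: rest2)
      | [] => runeSingle c ++ runeLoop []

def text_to_rune_indices (text : String) : List Int :=
  runeLoop (PySem.Str.upper text).toList

-- ===== PORT B =====
def pairsMap : PySem.Dict String Int := PySem.Dict.mk
  [("TH",2),("EO",12),("NG",21),("OE",22),("AE",25),("IA",27),("EA",28)]

def singlesMap : PySem.Dict String Int := PySem.Dict.mk
  [("F",0),("U",1),("O",3),("R",4),("C",5),("G",6),("W",7),("H",8),
   ("N",9),("I",10),("J",11),("P",13),("X",14),("S",15),("T",16),
   ("B",17),("E",18),("M",19),("L",20),("D",23),("A",24),("Y",26),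
   ("K",5),("V",1),("Z",15),("Q",5)]

-- 'if pending is not None and pending in SINGLES: out.append(SINGLES[pending])'
def flushPend (p : Option Char) : List Int :=
  match p with
  | none => []
  | some c =>
    match singlesMap.get? (String.ofList [c]) with
    | some v => [v]
    | none => []

-- the body of B's for-loop: one step of the streaming scan
def altStep (st : List Int × Option Char) (c : Char) : List Int × Option Char :=
  match st.2 with
  | some p =>
    match pairsMap.get? (String.ofList [p, c]) with
    | some v => (st.1 ++ [v], none)
    | none => (st.1 ++ flushPend (some p), some c)
  | none => (st.1, some c)

def text_to_rune_indices_alt (text : String) : List Int :=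
  let st := (PySem.Str.upper text).toList.foldl altStep ([], none)
  st.1 ++ flushPend st.2

-- ===== PRECONDITION & SPEC =====
def Spec_text_to_rune_indices (text : String) (out : List Int) : Prop := out = text_to_rune_indices_alt text
instance (text : String) (out : List Int) : Decidable (Spec_text_to_rune_indices text out) := by unfold Spec_text_to_rune_indices; infer_instance

-- ===== CLAIM (what is proved, stated in full; the proofs are below) =====
def Claim_equal_text_to_rune_indices : Prop := ∀ (text : String), Dom_text_to_rune_indices text → Spec_text_to_rune_indices text (text_to_rune_indices text)

-- ===== LEMMAS AND PROOFS =====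

-- String == against an ofList key, reduced to list equality
theorem pv_beq_ofList (s : String) (l : List Char) : (s == String.ofList l) = (s.toList == l) := by
  rw [Bool.eq_iff_iff]; simp only [beq_iff_eq]
  constructor
  · intro h; rw [h]; simp
  · intro h
    have h2 : String.ofList s.toList = String.ofList l := by rw [h]
    simpa using h2

-- A 2-char key lookup sees only the pair keys, in the same order in both dicts
theorem pv_pair_agree (c d : Char) :
    runeMap.get? (String.ofList [c, d]) = pairsMap.get? (String.ofList [c, d]) := by
  simp only [runeMap, pairsMap, PySem.Dict.get?_mk_cons, pv_beq_ofList]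
  simp

-- a pair key never starts with a non-letter
theorem pv_pair_none_of_not_alpha (c d : Char) (h : PySem.Chars.isalpha c = false) :
    pairsMap.get? (String.ofList [c, d]) = none := by
  have hx : ∀ x : Char, PySem.Chars.isalpha x = true → ¬ (x = c) := by
    intro x hxa e; rw [e] at hxa; rw [hxa] at h; exact Bool.noConfusion h
  simp only [pairsMap, PySem.Dict.get?_mk_cons, pv_beq_ofList]
  simp [hx 'T' (by decide), hx 'E' (by decide), hx 'N' (by decide), hx 'O' (by decide),
        hx 'A' (by decide), hx 'I' (by decide), PySem.Dict.get?]

-- B's flush of a pending char computes exactly A's 1-char step (nothing for non-letters)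
theorem pv_single_agree (c : Char) :
    flushPend (some c) = if PySem.Chars.isalpha c then runeSingle c else [] := by
  by_cases h : c ∈ ['F','U','O','R','C','G','W','H','N','I','J','P','X','S','T',
                    'B','E','M','L','D','A','Y','K','V','Z','Q']
  · fin_cases h <;> decide
  · simp only [List.mem_cons, List.not_mem_nil, or_false, not_or] at h
    obtain ⟨n1,n2,n3,n4,n5,n6,n7,n8,n9,n10,n11,n12,n13,n14,n15,n16,n17,n18,n19,n20,
            n21,n22,n23,n24,n25,n26⟩ := h
    have e : flushPend (some c) = [] := by
      simp [flushPend, singlesMap, pv_beq_ofList, PySem.Dict.get?,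
            Ne.symm n1, Ne.symm n2, Ne.symm n3, Ne.symm n4, Ne.symm n5, Ne.symm n6, Ne.symm n7, Ne.symm n8, Ne.symm n9, Ne.symm n10, Ne.symm n11, Ne.symm n12, Ne.symm n13, Ne.symm n14, Ne.symm n15, Ne.symm n16, Ne.symm n17, Ne.symm n18, Ne.symm n19, Ne.symm n20, Ne.symm n21, Ne.symm n22, Ne.symm n23, Ne.symm n24, Ne.symm n25, Ne.symm n26]
    have e2 : runeSingle c = [] := by
      simp [runeSingle, runeMap, pv_beq_ofList, PySem.Dict.get?,
            Ne.symm n1, Ne.symm n2, Ne.symm n3, Ne.symm n4, Ne.symm n5, Ne.symm n6, Ne.symm n7, Ne.symm n8, Ne.symm n9, Ne.symm n10, Ne.symm n11, Ne.symm n12, Ne.symm n13, Ne.symm n14, Ne.symm n15, Ne.symm n16, Ne.symm n17, Ne.symm n18, Ne.symm n19, Ne.symm n20, Ne.symm n21, Ne.symm n22,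
            n23, n24, n25, n26]
    rw [e, e2]; simp
-- note: n5 is c ≠ 'C' (also a 1-char key), n23..n26 are the K/V/Z/Q elif tests

-- main loop invariant: B's fold from any state equals that state's output followed by
-- what A's loop produces from the pending char (if any) and the remaining characters
theorem pv_loop_agree (cs : List Char) : ∀ (out : List Int) (p : Option Char),
    (let st := cs.foldl altStep (out, p); st.1 ++ flushPend st.2) =
      out ++ (match p with | none => runeLoop cs | some q => runeLoop (q :: cs)) := by
  induction cs with
  | nil =>
    intro out p
    match p with
    | none => simp [flushPend, runeLoop]
    | some q =>
      simp only [List.foldl_nil, runeLoop]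
      rw [pv_single_agree q]
      by_cases hq : PySem.Chars.isalpha q
      · simp [hq]
      · simp [Bool.not_eq_true] at hq; simp [hq]
  | cons c rest ih =>
    intro out p
    match p with
    | none => simpa [altStep] using ih out (some c)
    | some q =>
      simp only [List.foldl_cons, altStep]
      cases hpair : pairsMap.get? (String.ofList [q, c]) with
      | some v =>
        have hq : PySem.Chars.isalpha q = true := by
          by_contra hq
          simp only [Bool.not_eq_true] at hq
          rw [pv_pair_none_of_not_alpha q c hq] at hpair
          simp at hpair
        rw [ih (out ++ [v]) none]
        simp [runeLoop, hq, pv_pair_agree, hpair]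
      | none =>
        rw [ih (out ++ flushPend (some q)) (some c)]
        rw [pv_single_agree q]
        by_cases hq : PySem.Chars.isalpha q
        · simp [runeLoop, hq, pv_pair_agree, hpair]
        · simp only [Bool.not_eq_true] at hq
          simp [runeLoop, hq]

-- ===== VERDICT (by name: the statement is the Claim_ definition above) =====
theorem text_to_rune_indices_spec : Claim_equal_text_to_rune_indices := by
  intro text _
  unfold Spec_text_to_rune_indices text_to_rune_indices text_to_rune_indices_alt
  rw [pv_loop_agree ((PySem.Str.upper text).toList) [] none]
  simp
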